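-- pv_equiv track=rewrite | github.com/Institut-zdravotnych-analyz/OSN-public | OSN_common/helpers.py | collapse_diags
-- ===== SOURCE A (Python) =====
-- def collapse_diags(diags: list[str], diags_dct: dict[str, list[str]]) -> list[str]:
--     """Collapses a list of terminal diagnosis codes to their highest common group.
--     `diags_dct` represents mapping of 'skupina_diagnoz' to 'koncove_diagnozy'.
--     This dictionary has to be sorted!
--
--     Examples:
--     ['d06-']                                                    ->      ['d06-']
--     ['d060', 'd061', 'd067', 'd069']                            ->      ['d06-']
--     ['d06-', 'd060', 'd061', 'd067', 'd069']                    ->      ['d06-']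
--     ['a000', 'a001', 'a009', 'd060', 'd061', 'd067', 'd069']    ->      ['a00-', 'd06-']
--
--     """
--     diags_expanded = [expand_diags(d, diags_dct) for d in diags]
--     diags = set().union(*diags_expanded)
--     for skupina, koncove_diags in diags_dct.items():
--         if len(koncove_diags) > 0 and set(koncove_diags).issubset(diags):
--             diags = diags.difference(set(koncove_diags))
--             diags.add(skupina)
--     return sorted(diags)
--
-- def expand_diags(diags: str | list[str], diags_dct: dict[str, list[str]]) -> list[str]:
--     """Expands a a list of diagnosis codes to their terminal values codes
--     `diags_dct` represents mapping of 'skupina_diagnoz' to 'koncove_diagnozy'.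
--
--     Examples:
--     'd060'              ->      ['d060']
--     'd06-'              ->      ['d060', 'd061', 'd067', 'd069']
--     ['d06-', 'a00-']    ->      ['a000', 'a001', 'a009', 'd060', 'd061', 'd067', 'd069']
--
--     Warning: Not raising error for non-existing diagnoses.
--
--     """
--     if isinstance(diags, str):
--         diags = [diags]
--
--     diags_out = set()
--     for d in diags:
--         d = d.strip().lower()
--         diags_add = diags_dct.get(d, [d])
--         diags_out = diags_out.union(set(diags_add))
--
--     return sorted(diags_out)
-- ===== SOURCE B (Python) =====
-- def collapse_diags(diags, diags_dct):
--     """Same result as A, but maintains a strictly-sorted list of current codes: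
--     one-pass expansion into a set, one sort, then per group a binary-search
--     subset test, merge difference and a sorted insertion; no final sort."""
--     pool = set()
--     for d in diags:
--         key = d.strip().lower()
--         pool.update(diags_dct.get(key, (key,)))
--     cur = sorted(pool)
--     for skupina, koncove in diags_dct.items():
--         if koncove and _all_in_sorted(koncove, cur):
--             ks = sorted(set(koncove))
--             cur = _insert_sorted(_diff_sorted(cur, ks), skupina)
--     return cur
--
-- def _all_in_sorted(xs, cur):
--     # is every element of xs in the strictly sorted list cur? (binary search each)
--     n = len(cur)
--     for x in xs:
--         lo, hi = 0, n
--         while lo < hi: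
--             mid = (lo + hi) // 2
--             if cur[mid] < x:
--                 lo = mid + 1
--             else:
--                 hi = mid
--         if lo == n or cur[lo] != x:
--             return False
--     return True
--
-- def _diff_sorted(cur, ks):
--     # both strictly sorted: elements of cur not in ks, order kept;
--     # binary-search each k and copy the untouched chunks by slicing
--     out = []
--     start = 0
--     n = len(cur)
--     for k in ks:
--         lo, hi = start, n
--         while lo < hi:
--             mid = (lo + hi) // 2
--             if cur[mid] < k:
--                 lo = mid + 1
--             else:
--                 hi = mid
--         out.extend(cur[start:lo])
--         if lo < n and cur[lo] == k:
--             start = lo + 1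
--         else:
--             start = lo
--     out.extend(cur[start:])
--     return out
--
-- def _insert_sorted(lst, x):
--     # insert x into strictly sorted lst unless already present (binary search + slices)
--     lo, hi = 0, len(lst)
--     while lo < hi:
--         mid = (lo + hi) // 2
--         if lst[mid] < x:
--             lo = mid + 1
--         else:
--             hi = mid
--     if lo < len(lst) and lst[lo] == x:
--         return lst
--     return lst[:lo] + [x] + lst[lo:]
-- ===== Notes on version B (the rewrite author's own statement) =====
-- stated objective: alternative
-- what changed: B replaces A's hash-set state (per-code expand with a sort each, set subset/difference/add, final sort) by a strictly sorted list of current codes built with one pass and one sort, then per group a binary-search subset test, a chunked binary-search difference and a binary-search insertion, so no final sort is needed.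
import Mathlib
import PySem

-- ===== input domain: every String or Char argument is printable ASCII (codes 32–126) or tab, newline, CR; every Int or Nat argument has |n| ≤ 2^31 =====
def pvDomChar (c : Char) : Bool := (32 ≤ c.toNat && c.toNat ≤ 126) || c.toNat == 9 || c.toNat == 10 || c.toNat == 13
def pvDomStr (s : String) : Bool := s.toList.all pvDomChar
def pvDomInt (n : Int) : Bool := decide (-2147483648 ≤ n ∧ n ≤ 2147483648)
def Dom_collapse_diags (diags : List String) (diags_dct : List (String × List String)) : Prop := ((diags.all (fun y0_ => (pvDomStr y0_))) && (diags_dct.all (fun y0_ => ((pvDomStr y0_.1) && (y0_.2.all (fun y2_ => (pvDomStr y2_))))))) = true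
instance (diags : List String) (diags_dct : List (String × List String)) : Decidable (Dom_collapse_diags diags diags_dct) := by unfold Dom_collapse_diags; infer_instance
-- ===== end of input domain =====

-- B keeps a strictly sorted list of current codes (binary-search subset test,
-- chunked difference, sorted insertion, no final sort) where A keeps a hash set
-- and sorts at the end; equal results.

-- ===== PORT A =====
-- expand_diags, called from collapse_diags always with a single string
def pvExpand (dct : PySem.Dict String (List String)) (d : String) : List String :=
  let key := PySem.Str.lower (PySem.Str.strip d)
  let diags_add := dct.getD key [key]
  let diags_out := PySem.Set.union (PySem.Set.empty : PySem.Set String) diags_add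
  PySem.List.sorted diags_out (fun x => x) false

def collapse_diags (diags : List String) (diags_dct : List (String × List String)) : List String :=
  let dct := PySem.Dict.ofList diags_dct
  let diags_expanded := diags.map (pvExpand dct)
  let s0 : PySem.Set String :=
    diags_expanded.foldl (fun s l => PySem.Set.union s l) (PySem.Set.empty : PySem.Set String)
  let s1 := dct.items.foldl (fun s p =>
    if p.2.length > 0 ∧ PySem.Set.issubset (PySem.Set.ofList p.2) s = true then
      PySem.Set.add (PySem.Set.diff s (PySem.Set.ofList p.2)) p.1
    else s) s0
  PySem.List.sorted s1 (fun x => x) false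

-- ===== PORT B =====
def pvFind (cur : List String) (x : String) (lo hi : Nat) : Nat :=
  if lo < hi then
    let mid := (lo + hi) / 2
    if cur.getD mid "" < x then pvFind cur x (mid + 1) hi
    else pvFind cur x lo mid
  else lo
termination_by hi - lo
decreasing_by all_goals omega

def pvSubsetSorted (xs cur : List String) : Bool :=
  xs.all (fun x =>
    let i := pvFind cur x 0 cur.length
    decide (i < cur.length) && (cur.getD i "" == x))

def pvDiffGo (cur : List String) : List String → Nat → List String
  | [], start => cur.drop start
  | k :: ks, start =>
    let lo := pvFind cur k start cur.length
    (cur.take lo).drop start ++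
      pvDiffGo cur ks (if lo < cur.length ∧ cur.getD lo "" = k then lo + 1 else lo)

def pvDiffSorted (cur ks : List String) : List String := pvDiffGo cur ks 0


-- lo = the binary-search position computed by Source B's while loop (= pvFind)
def pvInsertSorted (lst : List String) (x : String) : List String :=
  if pvFind lst x 0 lst.length < lst.length ∧ lst.getD (pvFind lst x 0 lst.length) "" = x then lst
  else lst.take (pvFind lst x 0 lst.length) ++ [x] ++ lst.drop (pvFind lst x 0 lst.length)


def collapse_diags_alt (diags : List String) (diags_dct : List (String × List String)) : List String :=
  let dct := PySem.Dict.ofList diags_dct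
  let pool : PySem.Set String := diags.foldl (fun s d =>
    let key := PySem.Str.lower (PySem.Str.strip d)
    PySem.Set.update s (dct.getD key [key])) (PySem.Set.empty : PySem.Set String)
  let cur0 := PySem.List.sorted pool (fun x => x) false
  dct.items.foldl (fun cur p =>
    if p.2.isEmpty then cur
    else if pvSubsetSorted p.2 cur then
      let ks := PySem.List.sorted (PySem.Set.ofList p.2) (fun x => x) false
      pvInsertSorted (pvDiffSorted cur ks) p.1
    else cur) cur0

-- ===== PRECONDITION & SPEC =====
def Spec_collapse_diags (diags : List String) (diags_dct : List (String × List String)) (out : List String) : Prop := out = collapse_diags_alt diags diags_dct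
instance (diags : List String) (diags_dct : List (String × List String)) (out : List String) : Decidable (Spec_collapse_diags diags diags_dct out) := by unfold Spec_collapse_diags; infer_instance

-- ===== CLAIM (what is proved, stated in full; the proofs are below) =====
def Claim_equal_collapse_diags : Prop := ∀ (diags : List String) (diags_dct : List (String × List String)), Dom_collapse_diags diags diags_dct → Spec_collapse_diags diags diags_dct (collapse_diags diags diags_dct)

-- ===== LEMMAS AND PROOFS =====

theorem pvFind_spec (cur : List String) (x : String) (lo hi : Nat)
    (hsort : cur.Pairwise (· ≤ ·)) (hlh : lo ≤ hi) (hhi : hi ≤ cur.length) :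
    lo ≤ pvFind cur x lo hi ∧ pvFind cur x lo hi ≤ hi ∧
      (∀ j, lo ≤ j → j < pvFind cur x lo hi → cur.getD j "" < x) ∧
      (∀ j, pvFind cur x lo hi ≤ j → j < hi → ¬ cur.getD j "" < x) := by
  have hmono : ∀ p q, p ≤ q → q < cur.length → cur.getD p "" ≤ cur.getD q "" := by
    intro p q hpq hq
    rcases Nat.eq_or_lt_of_le hpq with rfl | hlt
    · exact le_refl _
    · rw [List.getD_eq_getElem _ _ (lt_trans hlt hq), List.getD_eq_getElem _ _ hq]
      exact List.pairwise_iff_getElem.1 hsort p q _ _ hlt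
  clear hsort
  revert hlh hhi
  fun_induction pvFind cur x lo hi with
  | case1 lo hi hlt mid hmid ih =>
    intro hlh hhi
    obtain ⟨h1, h2, h3, h4⟩ := ih (by omega) hhi
    refine ⟨by omega, h2, ?_, h4⟩
    intro j hj1 hj2
    by_cases hjm : j ≤ mid
    · exact lt_of_le_of_lt (hmono j mid hjm (by omega)) hmid
    · exact h3 j (by omega) hj2
  | case2 lo hi hlt mid hmid ih =>
    intro hlh hhi
    obtain ⟨h1, h2, h3, h4⟩ := ih (by omega) (by omega)
    refine ⟨h1, by omega, h3, ?_⟩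
    intro j hj1 hj2
    by_cases hjm : j < mid
    · exact h4 j hj1 hjm
    · intro hcon
      exact hmid (lt_of_le_of_lt (hmono mid j (by omega) (by omega)) hcon)
  | case3 lo hi hnlt =>
    intro hlh hhi
    exact ⟨le_refl _, by omega, fun j h1 h2 => absurd (lt_of_le_of_lt h1 h2) (by omega),
      fun j h1 h2 => absurd (lt_of_lt_of_le h2 (by omega : hi ≤ lo)) (by omega)⟩

theorem pvSubsetSorted_iff (xs cur : List String) (hc : cur.Pairwise (· < ·)) :
    pvSubsetSorted xs cur = true ↔ ∀ x ∈ xs, x ∈ cur := by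
  have hle : cur.Pairwise (· ≤ ·) := hc.imp le_of_lt
  simp only [pvSubsetSorted, List.all_eq_true]
  refine forall₂_congr (fun x hx => ?_)
  obtain ⟨h1, h2, h3, h4⟩ := pvFind_spec cur x 0 cur.length hle (Nat.zero_le _) (le_refl _)
  set i := pvFind cur x 0 cur.length with hi
  simp only [Bool.and_eq_true, decide_eq_true_eq, beq_iff_eq]
  constructor
  · rintro ⟨hilt, hieq⟩
    rw [← hieq, List.getD_eq_getElem _ _ hilt]
    exact List.getElem_mem hilt
  · intro hmem
    obtain ⟨j, hj, hjx⟩ := List.mem_iff_getElem.1 hmem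
    have hjge : i ≤ j := by
      by_contra hcon
      have := h3 j (Nat.zero_le _) (by omega)
      rw [List.getD_eq_getElem _ _ hj, hjx] at this
      exact lt_irrefl x this
    have hilt : i < cur.length := lt_of_le_of_lt hjge hj
    refine ⟨hilt, ?_⟩
    have hxi : ¬ cur.getD i "" < x := h4 i (le_refl _) hilt
    have hix : cur.getD i "" ≤ cur.getD j "" := by
      rcases Nat.eq_or_lt_of_le hjge with rfl | hlt
      · exact le_refl _
      · rw [List.getD_eq_getElem _ _ hilt, List.getD_eq_getElem _ _ hj]
        exact le_of_lt (List.pairwise_iff_getElem.1 hc i j _ _ hlt)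
    rw [List.getD_eq_getElem _ _ hj, hjx] at hix
    exact le_antisymm hix (not_lt.1 hxi)

theorem mem_drop_form (cur : List String) (m : Nat) (x : String) (hx : x ∈ cur.drop m) :
    ∃ j, m ≤ j ∧ ∃ (hj : j < cur.length), x = cur[j] := by
  obtain ⟨i, hi, hieq⟩ := List.mem_iff_getElem.1 hx
  rw [List.getElem_drop] at hieq
  have hlen : m + i < cur.length := by
    have := List.length_drop (l := cur) (i := m) ▸ hi
    omega
  exact ⟨m + i, by omega, hlen, hieq.symm⟩

theorem mem_chunk_form (cur : List String) (s t : Nat) (x : String)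
    (hx : x ∈ (cur.take t).drop s) :
    ∃ j, s ≤ j ∧ j < t ∧ ∃ (hj : j < cur.length), x = cur[j] := by
  obtain ⟨j, hj1, hj2, hjeq⟩ := mem_drop_form (cur.take t) s x hx
  have hjt : j < t := by simp only [List.length_take] at hj2; omega
  have hjlen : j < cur.length := by simp only [List.length_take] at hj2; omega
  refine ⟨j, hj1, hjt, hjlen, ?_⟩
  rw [hjeq, List.getElem_take]

theorem pvDiffGo_eq_filter (cur : List String) (ks : List String) (start : Nat)
    (hc : cur.Pairwise (· < ·)) (hk : ks.Pairwise (· < ·))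
    (hstart : start ≤ cur.length)
    (hpre : ∀ k ∈ ks, ∀ j, j < start → (hj : j < cur.length) → cur[j] < k) :
    pvDiffGo cur ks start = (cur.drop start).filter (fun x => !ks.elem x) := by
  induction ks generalizing start with
  | nil => simp [pvDiffGo]
  | cons k ks ih =>
    obtain ⟨h1, h2, h3, h4⟩ :=
      pvFind_spec cur k start cur.length (hc.imp le_of_lt) hstart (le_refl _)
    simp only [pvDiffGo]
    set lo := pvFind cur k start cur.length with hlo
    have hall_lt_k : ∀ j, j < lo → (hj : j < cur.length) → cur[j] < k := by
      intro j hjlo hj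
      by_cases hjs : j < start
      · exact hpre k List.mem_cons_self j hjs hj
      · have := h3 j (by omega) hjlo
        rwa [List.getD_eq_getElem _ _ hj] at this
    have hchunk_lt : ∀ x ∈ (cur.take lo).drop start, x < k := by
      intro x hx
      obtain ⟨j, hj1, hj2, hj3, hjeq⟩ := mem_chunk_form cur start lo x hx
      exact hjeq ▸ hall_lt_k j hj2 hj3
    have hsplit : cur.drop start = (cur.take lo).drop start ++ cur.drop lo := by
      conv_lhs => rw [← List.take_append_drop lo cur]
      rw [List.drop_append_of_le_length (by rw [List.length_take]; omega)]
    rw [hsplit, List.filter_append]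
    have hchunk_filter : ((cur.take lo).drop start).filter (fun x => !(k :: ks).elem x)
        = (cur.take lo).drop start := by
      rw [List.filter_eq_self]
      intro a ha
      have halt := hchunk_lt a ha
      have hak : ¬ a = k := fun h => lt_irrefl a (h ▸ halt)
      have haks : a ∉ ks := fun h =>
        lt_irrefl a (lt_trans halt (List.rel_of_pairwise_cons hk h))
      simp [List.mem_cons, hak, haks]
    rw [hchunk_filter]
    congr 1
    by_cases hfound : lo < cur.length ∧ cur.getD lo "" = k
    · rw [if_pos hfound]
      obtain ⟨hlolen, hloeq⟩ := hfound
      rw [List.getD_eq_getElem _ _ hlolen] at hloeq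
      rw [List.drop_eq_getElem_cons hlolen, List.filter_cons]
      have hknot : (!(k :: ks).elem cur[lo]) = false := by
        simp [List.mem_cons, hloeq]
      rw [hknot]
      simp only [Bool.false_eq_true, if_false]
      have hpre1 : ∀ k2 ∈ ks, ∀ j, j < lo + 1 → (hj : j < cur.length) → cur[j] < k2 := by
        intro k2 hk2 j hjlo hj
        rcases Nat.lt_or_ge j lo with hjlt | hjge
        · exact lt_trans (hall_lt_k j hjlt hj) (List.rel_of_pairwise_cons hk hk2)
        · have : j = lo := by omega
          subst this
          rw [hloeq]
          exact List.rel_of_pairwise_cons hk hk2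
      rw [ih (lo + 1) hk.tail (by omega) hpre1]
      apply (List.filter_congr _).symm
      intro x hx
      obtain ⟨j, hj1, hj2, hjeq⟩ := mem_drop_form cur (lo + 1) x hx
      have hkx : k < x := by
        rw [hjeq, ← hloeq]
        exact List.pairwise_iff_getElem.1 hc lo j hlolen hj2 (by omega)
      have hxk : ¬ x = k := fun h => lt_irrefl k (h ▸ hkx)
      simp [List.mem_cons, hxk]
    · rw [if_neg hfound]
      have hpre2 : ∀ k2 ∈ ks, ∀ j, j < lo → (hj : j < cur.length) → cur[j] < k2 := by
        intro k2 hk2 j hjlo hj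
        exact lt_trans (hall_lt_k j hjlo hj) (List.rel_of_pairwise_cons hk hk2)
      rw [ih lo hk.tail h2 hpre2]
      apply (List.filter_congr _).symm
      intro x hx
      obtain ⟨j, hj1, hj2, hjeq⟩ := mem_drop_form cur lo x hx
      have hlolen : lo < cur.length := by omega
      have hlok : k < cur[lo] := by
        have hge : ¬ cur.getD lo "" < k := h4 lo (le_refl _) hlolen
        rw [List.getD_eq_getElem _ _ hlolen] at hge
        have hne : ¬ cur[lo] = k := fun h => hfound ⟨hlolen, by rw [List.getD_eq_getElem _ _ hlolen, h]⟩
        exact lt_of_le_of_ne (not_lt.1 hge) (fun h => hne h.symm)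
      have hkx : k < x := by
        rw [hjeq]
        rcases Nat.eq_or_lt_of_le hj1 with rfl | hjgt
        · exact hlok
        · exact lt_trans hlok (List.pairwise_iff_getElem.1 hc lo j hlolen hj2 hjgt)
      have hxk : ¬ x = k := fun h => lt_irrefl k (h ▸ hkx)
      simp [List.mem_cons, hxk]

theorem pvDiffSorted_eq_filter (cur ks : List String)
    (hc : cur.Pairwise (· < ·)) (hk : ks.Pairwise (· < ·)) :
    pvDiffSorted cur ks = cur.filter (fun x => !ks.elem x) := by
  have := pvDiffGo_eq_filter cur ks 0 hc hk (Nat.zero_le _)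
    (fun k _ j hj _ => absurd hj (Nat.not_lt_zero j))
  simpa [pvDiffSorted] using this

theorem mem_pvInsertSorted (lst : List String) (x y : String) :
    y ∈ pvInsertSorted lst x ↔ y ∈ lst ∨ y = x := by
  unfold pvInsertSorted
  split_ifs with h
  · obtain ⟨hlt, heq⟩ := h
    constructor
    · exact Or.inl
    · rintro (h2 | rfl)
      · exact h2
      · rw [← heq, List.getD_eq_getElem _ _ hlt]
        exact List.getElem_mem hlt
  · simp only [List.mem_append, List.mem_singleton]
    constructor
    · rintro ((h2 | h2) | h2)
      · exact Or.inl (List.mem_of_mem_take h2)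
      · exact Or.inr h2
      · exact Or.inl (List.mem_of_mem_drop h2)
    · rintro (h2 | rfl)
      · rw [← List.take_append_drop (pvFind lst x 0 lst.length) lst] at h2
        rcases List.mem_append.1 h2 with h3 | h3
        · exact Or.inl (Or.inl h3)
        · exact Or.inr h3
      · exact Or.inl (Or.inr rfl)

theorem pairwise_pvInsertSorted (lst : List String) (x : String)
    (h : lst.Pairwise (· < ·)) : (pvInsertSorted lst x).Pairwise (· < ·) := by
  unfold pvInsertSorted
  obtain ⟨h1, h2, h3, h4⟩ := pvFind_spec lst x 0 lst.length (h.imp le_of_lt) (Nat.zero_le _) (le_refl _)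
  set lo := pvFind lst x 0 lst.length with hlo
  split_ifs with hf
  · exact h
  · have htake : ∀ a ∈ lst.take lo, a < x := by
      intro a ha
      obtain ⟨i, hi, hieq⟩ := List.mem_iff_getElem.1 ha
      have hilen : i < lst.length := lt_of_lt_of_le hi (by simp [List.length_take])
      have hilo : i < lo := lt_of_lt_of_le hi (by simp [List.length_take])
      have := h3 i (Nat.zero_le _) hilo
      rw [List.getD_eq_getElem _ _ hilen] at this
      rw [← hieq, List.getElem_take]
      exact this
    have hdrop : ∀ b ∈ lst.drop lo, x < b := by
      intro b hb
      obtain ⟨i, hi, hieq⟩ := List.mem_iff_getElem.1 hb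
      rw [List.getElem_drop] at hieq
      have hlen : lo + i < lst.length := by
        have := List.length_drop (l := lst) (i := lo) ▸ hi
        omega
      have hlolen : lo < lst.length := by omega
      have hxle : x ≤ lst[lo] := not_lt.1 (by
        have := h4 lo (le_refl _) hlolen
        rwa [List.getD_eq_getElem _ _ hlolen] at this)
      push Not at hf
      have hxlt : x < lst[lo] := lt_of_le_of_ne hxle (fun he => (hf hlolen)
        (by rw [List.getD_eq_getElem _ _ hlolen]; exact he.symm))
      rw [← hieq]
      rcases Nat.eq_zero_or_pos i with rfl | hpos
      · simpa using hxlt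
      · exact lt_trans hxlt (List.pairwise_iff_getElem.1 h lo (lo + i) hlolen hlen (by omega))
    rw [List.append_assoc, List.singleton_append]
    refine List.pairwise_append.2 ⟨h.sublist (List.take_sublist _ _), ?_, ?_⟩
    · exact List.pairwise_cons.2 ⟨hdrop, h.sublist (List.drop_sublist _ _)⟩
    · intro a ha b hb
      rcases List.mem_cons.1 hb with rfl | hb2
      · exact htake a ha
      · exact lt_trans (htake a ha) (hdrop b hb2)

def pvRel (s cur : List String) : Prop :=
  s.Nodup ∧ cur.Pairwise (· < ·) ∧ ∀ x, x ∈ cur ↔ x ∈ s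

theorem pvRel_step (p : String × List String) (s cur : List String) (h : pvRel s cur) :
    pvRel (if p.2.length > 0 ∧ PySem.Set.issubset (PySem.Set.ofList p.2) s = true then
             PySem.Set.add (PySem.Set.diff s (PySem.Set.ofList p.2)) p.1 else s)
          (if p.2.isEmpty then cur
           else if pvSubsetSorted p.2 cur then
             let ks := PySem.List.sorted (PySem.Set.ofList p.2) (fun x => x) false
             pvInsertSorted (pvDiffSorted cur ks) p.1
           else cur) := by
  obtain ⟨hnd, hpw, hmem⟩ := h
  have hsub_iff : pvSubsetSorted p.2 cur = true ↔ PySem.Set.issubset (PySem.Set.ofList p.2) s = true := by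
    rw [pvSubsetSorted_iff p.2 cur hpw, PySem.Set.issubset_iff]
    constructor
    · intro hh x hx
      exact (hmem x).1 (hh x ((PySem.Set.mem_ofList _ _).1 hx))
    · intro hh x hx
      exact (hmem x).2 (hh x ((PySem.Set.mem_ofList _ _).2 hx))
  by_cases hemp : p.2.isEmpty
  · have hlen : ¬ (p.2.length > 0) := by simp_all [List.isEmpty_iff]
    rw [if_pos hemp, if_neg (by tauto)]
    exact ⟨hnd, hpw, hmem⟩
  · rw [if_neg hemp]
    have hlen : p.2.length > 0 := by
      simp only [List.isEmpty_iff] at hemp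
      exact List.length_pos_of_ne_nil hemp
    by_cases hsub : pvSubsetSorted p.2 cur = true
    · rw [if_pos hsub, if_pos ⟨hlen, hsub_iff.1 hsub⟩]
      simp only []
      set ks := PySem.List.sorted (PySem.Set.ofList p.2) (fun x => x) false with hks
      have hks_pw : ks.Pairwise (· < ·) := PySem.List.sorted_ofList_pairwise_lt p.2
      have hks_mem : ∀ x, x ∈ ks ↔ x ∈ p.2 := fun x => by
        rw [hks, PySem.List.mem_sorted, PySem.Set.mem_ofList]
      have hdiff := pvDiffSorted_eq_filter cur ks hpw hks_pw
      refine ⟨PySem.Set.nodup_add _ _ (PySem.Set.nodup_diff _ _ hnd), ?_, ?_⟩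
      · exact pairwise_pvInsertSorted _ _ (hdiff ▸ hpw.filter _)
      · intro x
        rw [mem_pvInsertSorted, hdiff, List.mem_filter, PySem.Set.mem_add, PySem.Set.mem_diff]
        simp only [Bool.not_eq_eq_eq_not, Bool.not_true, List.elem_eq_mem,
          decide_eq_false_iff_not]
        rw [hmem x, hks_mem x, PySem.Set.mem_ofList]
    · rw [if_neg hsub, if_neg (fun hh => hsub (hsub_iff.2 hh.2))]
      exact ⟨hnd, hpw, hmem⟩

theorem pvRel_foldl (items : List (String × List String)) (s cur : List String)
    (h : pvRel s cur) :
    pvRel (items.foldl (fun s p =>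
             if p.2.length > 0 ∧ PySem.Set.issubset (PySem.Set.ofList p.2) s = true then
               PySem.Set.add (PySem.Set.diff s (PySem.Set.ofList p.2)) p.1 else s) s)
          (items.foldl (fun cur p =>
             if p.2.isEmpty then cur
             else if pvSubsetSorted p.2 cur then
               let ks := PySem.List.sorted (PySem.Set.ofList p.2) (fun x => x) false
               pvInsertSorted (pvDiffSorted cur ks) p.1
             else cur) cur) := by
  induction items generalizing s cur with
  | nil => exact h
  | cons p ps ih => exact ih _ _ (pvRel_step p s cur h)

theorem mem_foldl_union (ls : List (List String)) (s : List String) (x : String) :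
    x ∈ ls.foldl (fun s l => PySem.Set.union s l) s ↔ x ∈ s ∨ ∃ l ∈ ls, x ∈ l := by
  induction ls generalizing s with
  | nil => simp
  | cons l ls ih =>
    simp only [List.foldl_cons, ih, PySem.Set.mem_union, List.mem_cons]
    constructor
    · rintro ((h | h) | ⟨l', hl', hx⟩)
      · exact Or.inl h
      · exact Or.inr ⟨l, Or.inl rfl, h⟩
      · exact Or.inr ⟨l', Or.inr hl', hx⟩
    · rintro (h | ⟨l', (rfl | hl'), hx⟩)
      · exact Or.inl (Or.inl h)
      · exact Or.inl (Or.inr hx)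
      · exact Or.inr ⟨l', hl', hx⟩

theorem nodup_foldl_union (ls : List (List String)) (s : List String) (h : s.Nodup) :
    (ls.foldl (fun s l => PySem.Set.union s l) s).Nodup := by
  induction ls generalizing s with
  | nil => exact h
  | cons l ls ih => exact ih _ (PySem.Set.nodup_union _ _ h)

theorem mem_foldl_update (ds : List String) (f : String → List String) (s : List String) (x : String) :
    x ∈ ds.foldl (fun s d => PySem.Set.update s (f d)) s ↔ x ∈ s ∨ ∃ d ∈ ds, x ∈ f d := by
  induction ds generalizing s with
  | nil => simp
  | cons d ds ih =>
    simp only [List.foldl_cons, ih, PySem.Set.mem_update, List.mem_cons]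
    constructor
    · rintro ((h | h) | ⟨d', hd', hx⟩)
      · exact Or.inl h
      · exact Or.inr ⟨d, Or.inl rfl, h⟩
      · exact Or.inr ⟨d', Or.inr hd', hx⟩
    · rintro (h | ⟨d', (rfl | hd'), hx⟩)
      · exact Or.inl (Or.inl h)
      · exact Or.inl (Or.inr hx)
      · exact Or.inr ⟨d', hd', hx⟩

theorem nodup_foldl_update (ds : List String) (f : String → List String) (s : List String) (h : s.Nodup) :
    (ds.foldl (fun s d => PySem.Set.update s (f d)) s).Nodup := by
  induction ds generalizing s with
  | nil => exact h
  | cons d ds ih => exact ih _ (PySem.Set.nodup_update _ _ h)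

theorem pairwise_lt_sorted_of_nodup (xs : List String) (h : xs.Nodup) :
    (PySem.List.sorted xs (fun x => x) false).Pairwise (· < ·) := by
  have hle : (PySem.List.sorted xs (fun x => x) false).Pairwise (· ≤ ·) := by
    simpa using PySem.List.sorted_pairwise xs (fun x => x)
  have hnd : (PySem.List.sorted xs (fun x => x) false).Nodup :=
    ((PySem.List.sorted_perm xs (fun x => x) false).nodup_iff).2 h
  exact (hle.and hnd).imp (fun hh => lt_of_le_of_ne hh.1 hh.2)

-- ===== VERDICT (by name: the statement is the Claim_ definition above) =====
theorem collapse_diags_spec : Claim_equal_collapse_diags := by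
  unfold Claim_equal_collapse_diags
  intro diags diags_dct _
  unfold Spec_collapse_diags collapse_diags collapse_diags_alt
  simp only []
  set dct := PySem.Dict.ofList diags_dct with hdct
  set f : String → List String := fun d =>
    dct.getD (PySem.Str.lower (PySem.Str.strip d)) [PySem.Str.lower (PySem.Str.strip d)] with hf
  have hexp_mem : ∀ d x, x ∈ pvExpand dct d ↔ x ∈ f d := by
    intro d x
    simp [pvExpand, PySem.List.mem_sorted, PySem.Set.mem_union, hf]
  have hrel0 : pvRel
      ((diags.map (pvExpand dct)).foldl (fun s l => PySem.Set.union s l) (PySem.Set.empty : PySem.Set String))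
      (PySem.List.sorted (diags.foldl (fun s d => PySem.Set.update s (f d)) (PySem.Set.empty : PySem.Set String)) (fun x => x) false) := by
    refine ⟨nodup_foldl_union _ _ List.nodup_nil, ?_, ?_⟩
    · exact pairwise_lt_sorted_of_nodup _ (nodup_foldl_update _ _ _ List.nodup_nil)
    · intro x
      rw [PySem.List.mem_sorted, mem_foldl_update, mem_foldl_union]
      simp only [List.mem_map]
      constructor
      · rintro (h | ⟨d, hd, hx⟩)
        · exact absurd h (List.not_mem_nil)
        · exact Or.inr ⟨pvExpand dct d, ⟨d, hd, rfl⟩, (hexp_mem d x).2 hx⟩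
      · rintro (h | ⟨l, ⟨d, hd, rfl⟩, hx⟩)
        · exact absurd h (List.not_mem_nil)
        · exact Or.inr ⟨d, hd, (hexp_mem d x).1 hx⟩
  have hrel := pvRel_foldl dct.items _ _ hrel0
  obtain ⟨hs_nd, hc_pw, hc_mem⟩ := hrel
  have hc_nd : _ := hc_pw.imp (fun {a b} (h : a < b) => ne_of_lt h)
  exact PySem.List.sorted_eq_of_perm_of_pairwise_lt _ _ _
    ((List.perm_ext_iff_of_nodup hc_nd hs_nd).2 hc_mem)
    (by simpa using hc_pw)
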